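-- pv_equiv track=rewrite | github.com/fahamnaz/dabang_coders | ml_models/data/feature_engineering.py | _current_streak
-- ===== SOURCE A (Python) =====
-- def _current_streak(events: list[dict]) -> int:
--     """Number of consecutive correct answers at the tail of events."""
--     streak = 0
--     for e in reversed(events):
--         if e.get("correct", False):
--             streak += 1
--         else:
--             break
--     return streak
-- ===== SOURCE B (Python) =====
-- def _current_streak(events: list[dict]) -> int:
--     """Number of consecutive correct answers at the tail of events."""
--     streak = 0
--     for e in events:
--         streak = streak + 1 if e.get("correct", False) else 0
--     return streak
-- ===== Notes on version B (the rewrite author's own statement) =====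
-- stated objective: alternative
-- what changed: B scans forward with a reset-on-failure run-length counter over the whole list, instead of A's reversed scan that breaks at the first wrong answer.
import Mathlib
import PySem

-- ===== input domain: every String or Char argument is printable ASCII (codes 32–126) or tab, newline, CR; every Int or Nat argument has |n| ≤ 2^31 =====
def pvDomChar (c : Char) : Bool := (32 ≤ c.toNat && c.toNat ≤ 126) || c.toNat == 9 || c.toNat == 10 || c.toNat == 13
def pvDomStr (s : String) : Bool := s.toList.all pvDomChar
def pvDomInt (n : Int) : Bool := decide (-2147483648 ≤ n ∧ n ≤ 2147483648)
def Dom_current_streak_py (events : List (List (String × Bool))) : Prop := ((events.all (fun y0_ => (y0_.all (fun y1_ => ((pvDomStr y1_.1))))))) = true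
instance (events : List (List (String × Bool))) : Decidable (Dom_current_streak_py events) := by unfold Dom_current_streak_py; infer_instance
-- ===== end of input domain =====

-- B replaces A's reversed scan with early break by a full forward pass keeping a reset-on-failure run-length counter (alternative decomposition, same cost).


-- ===== PORT A =====
-- the 'for … in reversed(events): … else break' loop, as structural recursion over events.reverse
def pvStreakLoopA (revEvents : List (List (String × Bool))) : Int :=
  match revEvents with
  | [] => 0
  | e :: rest => if (PySem.Dict.mk e).getD "correct" false then pvStreakLoopA rest + 1 else 0

def current_streak_py (events : List (List (String × Bool))) : Int :=
  pvStreakLoopA events.reverse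

-- ===== PORT B =====
def current_streak_py_alt (events : List (List (String × Bool))) : Int :=
  events.foldl (fun streak e => if (PySem.Dict.mk e).getD "correct" false then streak + 1 else 0) 0

-- ===== PRECONDITION & SPEC =====
def Spec_current_streak_py (events : List (List (String × Bool))) (out : Int) : Prop := out = current_streak_py_alt events
instance (events : List (List (String × Bool))) (out : Int) : Decidable (Spec_current_streak_py events out) := by unfold Spec_current_streak_py; infer_instance

-- ===== CLAIM (what is proved, stated in full; the proofs are below) =====
def Claim_equal_current_streak_py : Prop := ∀ (events : List (List (String × Bool))), Dom_current_streak_py events → Spec_current_streak_py events (current_streak_py events)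

-- ===== LEMMAS AND PROOFS =====
theorem pvFoldl_eq_loopA (events : List (List (String × Bool))) :
    events.foldl (fun streak e => if (PySem.Dict.mk e).getD "correct" false then streak + 1 else 0) 0
      = pvStreakLoopA events.reverse := by
  induction events using List.reverseRecOn with
  | nil => simp [pvStreakLoopA]
  | append_singleton l e ih =>
      rw [List.foldl_append, List.reverse_append]
      simp only [List.foldl_cons, List.foldl_nil, List.reverse_singleton, List.singleton_append,
        pvStreakLoopA, ih]

-- ===== VERDICT (by name: the statement is the Claim_ definition above) =====
theorem current_streak_py_spec : Claim_equal_current_streak_py := by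
  intro events _
  unfold Spec_current_streak_py current_streak_py current_streak_py_alt
  exact (pvFoldl_eq_loopA events).symm
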